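-- pv_equiv track=rewrite | github.com/JeonHoKang/Lockheed_Task_Planner | src/tree_toolset.py | create_dict_from_list
-- ===== SOURCE A (Python) =====
-- def create_dict_from_list(pairs):
--     local_dict = {}
--     name_id_dict = {}
--     latest_id = -1
--     index_list = []
--     for pair in pairs:
--         parent = pair[0]
--         child = pair[1]
--         child_id = 0
--         parent_id = 0
--         if parent not in name_id_dict:
--             latest_id += 1
--             local_dict[latest_id] = parent
--             parent_id = latest_id
--             name_id_dict[parent] = parent_id
--
--         else:
--             parent_id = name_id_dict[parent]
--
--         if child not in name_id_dict:
--             latest_id += 1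
--             local_dict[latest_id] = child
--             child_id = latest_id
--             name_id_dict[child] = child_id
--         else:
--             child_id = name_id_dict[child]
--
--         index_list.append((parent_id, child_id))
--
--     return local_dict, index_list
-- ===== SOURCE B (Python) =====
-- def create_dict_from_list(pairs):
--     # Ids are first-appearance ranks: dedupe the flattened parent/child name
--     # stream (dict.fromkeys keeps first occurrences in order), then every id is
--     # just a position in that list -- no counter and no name->id dict at all.
--     names = list(dict.fromkeys(n for pair in pairs for n in (pair[0], pair[1])))
--     local_dict = dict(enumerate(names))
--     index_list = [(names.index(p), names.index(c)) for p, c in pairs]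
--     return local_dict, index_list
-- ===== Notes on version B (the rewrite author's own statement) =====
-- stated objective: alternative
-- what changed: B drops A's id counter and name->id dict entirely: it dedupes the flattened parent/child name stream with dict.fromkeys and reads every id off as a position in that list (enumerate for the id->name dict, list.index for the id pairs), instead of A's single stateful loop that increments a counter and branches on dict membership per name.
import Mathlib
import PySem

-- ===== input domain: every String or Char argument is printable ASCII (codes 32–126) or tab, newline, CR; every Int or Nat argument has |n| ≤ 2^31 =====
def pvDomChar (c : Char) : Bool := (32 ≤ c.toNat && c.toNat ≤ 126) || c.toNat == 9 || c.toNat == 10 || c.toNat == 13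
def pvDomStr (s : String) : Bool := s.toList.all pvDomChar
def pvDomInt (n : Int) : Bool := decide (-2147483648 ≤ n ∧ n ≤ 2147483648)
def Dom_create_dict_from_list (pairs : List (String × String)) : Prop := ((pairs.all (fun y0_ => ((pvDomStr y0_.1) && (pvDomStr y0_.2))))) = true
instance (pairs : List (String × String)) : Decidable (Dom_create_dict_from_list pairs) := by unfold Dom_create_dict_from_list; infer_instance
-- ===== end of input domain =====

-- B re-derives every id as a position in the ordered dedup of the flattened name stream
-- (dict.fromkeys + enumerate + list.index) instead of A's counter-and-dict loop; alternative
-- decomposition, same return value proved for all inputs.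


-- ===== PORT A =====
-- A's per-name block: 'if name not in name_id_dict: latest+=1; local[latest]=name; id=latest;
-- name_id[name]=id  else: id = name_id[name]' — returns the updated state and the id used.
def pvAssignA (loc : PySem.Dict Int String) (nid : PySem.Dict String Int) (latest : Int)
    (name : String) : PySem.Dict Int String × PySem.Dict String Int × Int × Int :=
  match nid.get? name with
  | some i => (loc, nid, latest, i)
  | none => (loc.insert (latest + 1) name, nid.insert name (latest + 1), latest + 1, latest + 1)

def pvStepA (s : PySem.Dict Int String × PySem.Dict String Int × Int × List (Int × Int))
    (pair : String × String) :
    PySem.Dict Int String × PySem.Dict String Int × Int × List (Int × Int) :=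
  let r1 := pvAssignA s.1 s.2.1 s.2.2.1 pair.1
  let r2 := pvAssignA r1.1 r1.2.1 r1.2.2.1 pair.2
  (r2.1, r2.2.1, r2.2.2.1, s.2.2.2 ++ [(r1.2.2.2, r2.2.2.2)])

def create_dict_from_list (pairs : List (String × String)) :
    (List (Int × String)) × (List (Int × Int)) :=
  let r := pairs.foldl pvStepA (PySem.Dict.empty, PySem.Dict.empty, -1, [])
  (r.1.items, r.2.2.2)

-- ===== PORT B =====
def create_dict_from_list_alt (pairs : List (String × String)) :
    (List (Int × String)) × (List (Int × Int)) :=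
  -- names = list(dict.fromkeys(n for pair in pairs for n in (pair[0], pair[1]))):
  -- dict.fromkeys as ordered dedup is PySem.List.dedup
  let names := PySem.List.dedup (pairs.flatMap (fun p => [p.1, p.2]))
  -- local_dict = dict(enumerate(names))
  let local_dict := (PySem.List.enumerate names).foldl
      (fun d q => d.insert q.1 q.2) PySem.Dict.empty
  -- names.index(x) never raises here (every name of pairs occurs in names),
  -- so (index? …).getD 0 is exact
  (local_dict.items,
   pairs.map (fun p => ((((PySem.List.index? names p.1).getD 0 : Nat) : Int),
                        (((PySem.List.index? names p.2).getD 0 : Nat) : Int))))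

-- ===== PRECONDITION & SPEC =====
def Spec_create_dict_from_list (pairs : List (String × String)) (out : (List (Int × String)) × (List (Int × Int))) : Prop := out = create_dict_from_list_alt pairs
instance (pairs : List (String × String)) (out : (List (Int × String)) × (List (Int × Int))) : Decidable (Spec_create_dict_from_list pairs out) := by unfold Spec_create_dict_from_list; infer_instance

-- ===== CLAIM (what is proved, stated in full; the proofs are below) =====
def Claim_equal_create_dict_from_list : Prop := ∀ (pairs : List (String × String)), Dom_create_dict_from_list pairs → Spec_create_dict_from_list pairs (create_dict_from_list pairs)

-- ===== LEMMAS AND PROOFS =====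

theorem pvEnum_append_singleton (xs : List String) (y : String) (s : Int) :
    PySem.List.enumerate (xs ++ [y]) s
      = PySem.List.enumerate xs s ++ [(s + (xs.length : Int), y)] := by
  induction xs generalizing s with
  | nil => simp [PySem.List.enumerate_cons, PySem.List.enumerate]
  | cons x xs ih =>
      simp only [List.cons_append, PySem.List.enumerate_cons, ih, List.length_cons]
      push_cast
      ring_nf

theorem pvIndex?_add_of_mem (ks : List String) (x n : String) (h : n ∈ ks) :
    PySem.List.index? (PySem.Set.add ks x) n = PySem.List.index? ks n := by
  unfold PySem.Set.add
  split
  · rfl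
  · exact PySem.List.index?_append_of_mem _ h

theorem pvMem_add (ks : List String) (x n : String) (h : n ∈ ks) : n ∈ PySem.Set.add ks x :=
  (PySem.Set.mem_add ks x n).mpr (Or.inl h)

theorem pvIndex?_update_of_mem (l : List String) (ks : List String) (n : String) (h : n ∈ ks) :
    PySem.List.index? (PySem.Set.update ks l) n = PySem.List.index? ks n := by
  induction l generalizing ks with
  | nil => rfl
  | cons x l ih =>
      have : PySem.Set.update ks (x :: l) = PySem.Set.update (PySem.Set.add ks x) l := rfl
      rw [this, ih _ (pvMem_add ks x n h), pvIndex?_add_of_mem ks x n h]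

-- one per-name A-step preserves the 'state is determined by the seen-name list' invariant
theorem pvAssignA_inv (loc : PySem.Dict Int String) (nid : PySem.Dict String Int) (latest : Int)
    (n : String) (ks : List String)
    (h1 : loc.items = PySem.List.enumerate ks)
    (h2 : ∀ m, nid.get? m = (PySem.List.index? ks m).map (fun i => (i : Int)))
    (h3 : latest = (ks.length : Int) - 1) :
    (pvAssignA loc nid latest n).1.items = PySem.List.enumerate (PySem.Set.add ks n) ∧
    (∀ m, (pvAssignA loc nid latest n).2.1.get? m
        = (PySem.List.index? (PySem.Set.add ks n) m).map (fun i => (i : Int))) ∧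
    (pvAssignA loc nid latest n).2.2.1 = ((PySem.Set.add ks n).length : Int) - 1 ∧
    (pvAssignA loc nid latest n).2.2.2
        = (((PySem.List.index? (PySem.Set.add ks n) n).getD 0 : Nat) : Int) ∧
    n ∈ PySem.Set.add ks n := by
  by_cases hm : n ∈ ks
  · have hadd : PySem.Set.add ks n = ks := by
      simp [PySem.Set.add, PySem.Set.contains, hm]
    obtain ⟨i, hi⟩ : ∃ i, PySem.List.index? ks n = some i := by
      rw [PySem.List.index?_eq_idxOf?]
      exact Option.isSome_iff_exists.mp (List.isSome_idxOf?.mpr hm)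
    have hg : nid.get? n = some (i : Int) := by rw [h2 n, hi]; rfl
    simp only [pvAssignA, hg, hadd]
    exact ⟨h1, h2, h3, by rw [hi]; rfl, hm⟩
  · have hadd : PySem.Set.add ks n = ks ++ [n] := by
      simp [PySem.Set.add, PySem.Set.contains, hm]
    have hnone : PySem.List.index? ks n = none := by
      rw [PySem.List.index?_eq_idxOf?]; exact List.idxOf?_eq_none_iff.mpr hm
    have hg : nid.get? n = none := by rw [h2 n, hnone]; rfl
    have hlen : latest + 1 = (ks.length : Int) := by omega
    have hself : PySem.List.index? (ks ++ [n]) n = some ks.length :=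
      PySem.List.index?_append_singleton_self ks n hm
    have hcont : loc.contains (latest + 1) = false := by
      rw [PySem.Dict.contains_eq_decide_mem_keys]
      simp only [PySem.Dict.keys, h1, PySem.List.map_fst_enumerate, decide_eq_false_iff_not,
        PySem.List.mem_pyRange_one]
      omega
    simp only [pvAssignA, hg, hadd]
    refine ⟨?_, ?_, ?_, ?_, by simp⟩
    · rw [PySem.Dict.items_insert_of_not_contains _ _ hcont, h1,
        pvEnum_append_singleton, hlen]
      simp
    · intro m
      rw [PySem.Dict.get?_insert]
      by_cases hmn : m = n
      · subst hmn
        rw [if_pos rfl, hself, hlen]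
        rfl
      · rw [if_neg hmn, h2 m]
        congr 1
        by_cases hmk : m ∈ ks
        · rw [PySem.List.index?_append_of_mem _ hmk]
        · rw [PySem.List.index?_eq_idxOf?, PySem.List.index?_eq_idxOf?,
            List.idxOf?_eq_none_iff.mpr hmk, List.idxOf?_eq_none_iff.mpr (by
              simp only [List.mem_append, List.mem_singleton]
              rintro (h | h) <;> [exact hmk h; exact hmn h])]
    · simp only [List.length_append, List.length_singleton]
      push_cast
      omega
    · rw [hself, hlen]
      rfl

-- MAIN INVARIANT: A's fold from a state determined by the seen-name list ks produces the
-- state of ks extended by the name stream, and records for every pair the ids that the FINAL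
-- seen-name list assigns (stability of first-occurrence positions under later appends).
theorem pvFoldA_inv (pairs : List (String × String)) :
    ∀ (ks : List String) (loc : PySem.Dict Int String) (nid : PySem.Dict String Int)
      (latest : Int) (idx : List (Int × Int)),
    loc.items = PySem.List.enumerate ks →
    (∀ m, nid.get? m = (PySem.List.index? ks m).map (fun i => (i : Int))) →
    latest = (ks.length : Int) - 1 →
    (pairs.foldl pvStepA (loc, nid, latest, idx)).1.items
        = PySem.List.enumerate (PySem.Set.update ks (pairs.flatMap (fun p => [p.1, p.2]))) ∧
    (pairs.foldl pvStepA (loc, nid, latest, idx)).2.2.2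
        = idx ++ pairs.map (fun p =>
            ((((PySem.List.index? (PySem.Set.update ks (pairs.flatMap (fun q => [q.1, q.2]))) p.1).getD 0 : Nat) : Int),
             (((PySem.List.index? (PySem.Set.update ks (pairs.flatMap (fun q => [q.1, q.2]))) p.2).getD 0 : Nat) : Int))) := by
  induction pairs with
  | nil => intro ks loc nid latest idx h1 h2 h3; exact ⟨h1, by simp⟩
  | cons p t ih =>
      intro ks loc nid latest idx h1 h2 h3
      obtain ⟨a1, a2, a3, a4, a5⟩ := pvAssignA_inv loc nid latest p.1 ks h1 h2 h3
      obtain ⟨b1, b2, b3, b4, b5⟩ :=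
        pvAssignA_inv _ _ _ p.2 (PySem.Set.add ks p.1) a1 a2 a3
      set ks2 := PySem.Set.add (PySem.Set.add ks p.1) p.2 with hks2
      have hkf : PySem.Set.update ks ((p :: t).flatMap (fun q => [q.1, q.2]))
          = PySem.Set.update ks2 (t.flatMap (fun q => [q.1, q.2])) := by
        simp only [List.flatMap_cons]
        rfl
      have hstep : (p :: t).foldl pvStepA (loc, nid, latest, idx)
          = t.foldl pvStepA
              ((pvAssignA (pvAssignA loc nid latest p.1).1 (pvAssignA loc nid latest p.1).2.1
                  (pvAssignA loc nid latest p.1).2.2.1 p.2).1,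
               (pvAssignA (pvAssignA loc nid latest p.1).1 (pvAssignA loc nid latest p.1).2.1
                  (pvAssignA loc nid latest p.1).2.2.1 p.2).2.1,
               (pvAssignA (pvAssignA loc nid latest p.1).1 (pvAssignA loc nid latest p.1).2.1
                  (pvAssignA loc nid latest p.1).2.2.1 p.2).2.2.1,
               idx ++ [((pvAssignA loc nid latest p.1).2.2.2,
                 (pvAssignA (pvAssignA loc nid latest p.1).1 (pvAssignA loc nid latest p.1).2.1
                   (pvAssignA loc nid latest p.1).2.2.1 p.2).2.2.2)]) := by
        rw [List.foldl_cons]; rfl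
      obtain ⟨c1, c2⟩ := ih ks2 _ _ _
        (idx ++ [((pvAssignA loc nid latest p.1).2.2.2,
          (pvAssignA (pvAssignA loc nid latest p.1).1 (pvAssignA loc nid latest p.1).2.1
            (pvAssignA loc nid latest p.1).2.2.1 p.2).2.2.2)]) b1 b2 b3
      have hid1 : PySem.List.index?
            (PySem.Set.update ks2 (t.flatMap (fun q => [q.1, q.2]))) p.1
          = PySem.List.index? (PySem.Set.add ks p.1) p.1 := by
        rw [pvIndex?_update_of_mem _ _ _ (pvMem_add _ _ _ a5)]
        exact pvIndex?_add_of_mem _ _ _ a5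
      have hid2 : PySem.List.index?
            (PySem.Set.update ks2 (t.flatMap (fun q => [q.1, q.2]))) p.2
          = PySem.List.index? ks2 p.2 :=
        pvIndex?_update_of_mem _ _ _ b5
      constructor
      · rw [hstep, hkf]
        exact c1
      · rw [hstep, hkf, c2, List.map_cons, a4, b4, hid1, hid2]
        simp

-- ===== VERDICT (by name: the statement is the Claim_ definition above) =====
theorem create_dict_from_list_spec : Claim_equal_create_dict_from_list := by
  intro pairs _
  unfold Spec_create_dict_from_list create_dict_from_list create_dict_from_list_alt
  have hnames : PySem.List.dedup (pairs.flatMap (fun p => [p.1, p.2]))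
      = PySem.Set.update [] (pairs.flatMap (fun p => [p.1, p.2])) := by
    rw [PySem.List.dedup_eq_ofList, PySem.Set.ofList_eq_foldl]
    rfl
  obtain ⟨h1, h2⟩ := pvFoldA_inv pairs [] PySem.Dict.empty PySem.Dict.empty (-1) []
    (by rfl)
    (by intro m; rw [PySem.List.index?_eq_idxOf?]; rfl)
    (by simp)
  have hitems : ((PySem.List.enumerate
        (PySem.List.dedup (pairs.flatMap (fun p => [p.1, p.2])))).foldl
      (fun d q => d.insert q.1 q.2) PySem.Dict.empty).items
      = PySem.List.enumerate (PySem.List.dedup (pairs.flatMap (fun p => [p.1, p.2]))) := by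
    have h := PySem.Dict.items_foldl_insert_fresh
      (PySem.List.enumerate (PySem.List.dedup (pairs.flatMap (fun p => [p.1, p.2]))))
      (fun q : Int × String => q.1) (fun q => q.2) PySem.Dict.empty
      (fun a _ => rfl)
      (by rw [PySem.List.map_fst_enumerate]; exact PySem.List.nodup_pyRange_one _ _)
    simpa using h
  rw [hnames] at hitems
  simp only [hnames, h1, h2, hitems, List.nil_append]
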